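-- pv_equiv track=rewrite | github.com/AdinaBusca-projects/python-recom | recom.py | recommend_items
-- ===== SOURCE A (Python) =====
-- def recommend_items(user_prefrences,category_list):
--
--        liked_genres = set()
--        for item in user_prefrences:
--            liked_genres.add(item)
--
--        recommendations = []
--        for item in category_list:
--             item_genres = set()
--             item["Genre"] = item["Genre"].lower()
--             genres = item["Genre"].split(";")
--
--             for genre in genres:
--                 item_genres.add(genre.strip())
--
--             score = len(item_genres & liked_genres)
--             if score > 0:
--                 recommendations.append((item["Title"],score))
--
--        recommendations.sort(key=lambda x: x[1], reverse = True)
--        return [item for item, _ in recommendations]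
-- ===== SOURCE B (Python) =====
-- def recommend_items(user_prefrences, category_list):
--     liked_genres = set(user_prefrences)
--     buckets = {}
--     for item in category_list:
--         genre = item["Genre"].lower()
--         item["Genre"] = genre
--         score = len({g.strip() for g in genre.split(";")} & liked_genres)
--         if score > 0:
--             buckets.setdefault(score, []).append(item["Title"])
--     return [title for s in sorted(buckets, reverse=True) for title in buckets[s]]
-- ===== Notes on version B (the rewrite author's own statement) =====
-- stated objective: alternative
-- what changed: B replaces A's collect-pairs-then-stable-sort(key=score, reverse=True) with a single-pass grouping of titles into score buckets (dict score -> titles in encounter order) emitted from the highest score down, so no (title, score) tuple list and no sort of the items is ever built.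
import Mathlib
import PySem

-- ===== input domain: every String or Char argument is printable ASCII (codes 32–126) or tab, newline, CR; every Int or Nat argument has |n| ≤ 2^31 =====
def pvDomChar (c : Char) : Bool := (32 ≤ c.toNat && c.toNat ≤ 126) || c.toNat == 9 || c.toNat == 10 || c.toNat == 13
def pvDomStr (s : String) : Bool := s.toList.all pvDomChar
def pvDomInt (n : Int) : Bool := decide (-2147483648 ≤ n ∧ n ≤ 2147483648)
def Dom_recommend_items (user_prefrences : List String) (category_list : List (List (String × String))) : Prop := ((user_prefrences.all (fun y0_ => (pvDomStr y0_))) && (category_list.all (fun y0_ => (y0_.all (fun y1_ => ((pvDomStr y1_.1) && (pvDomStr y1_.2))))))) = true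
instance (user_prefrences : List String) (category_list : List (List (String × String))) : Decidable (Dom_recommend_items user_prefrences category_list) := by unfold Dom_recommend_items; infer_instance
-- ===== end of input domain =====

-- B replaces the stable sort of (title, score) pairs by score buckets emitted from the highest
-- score down (a grouping/bucket pass); return values proved equal. Both A and B mutate each
-- item's "Genre" entry in place (lowercased) — the theorems are about the return value only.

-- ===== PORT A =====
def recommend_items (user_prefrences : List String) (category_list : List (List (String × String))) : List String :=
  let liked_genres : PySem.Set String := user_prefrences.foldl (fun s item => PySem.Set.add s item) PySem.Set.empty
  let recommendations : List (String × Int) := category_list.foldl (fun recs item =>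
      let d := PySem.Dict.ofList item
      let d1 := d.insert "Genre" (PySem.Str.lower (d.getD "Genre" ""))   -- item["Genre"] = item["Genre"].lower()
      let genres := (PySem.Str.split? (d1.getD "Genre" "") ";").getD []  -- sep ";" ≠ "" so split? is some: exact
      let item_genres : PySem.Set String := genres.foldl (fun s genre => PySem.Set.add s (PySem.Str.strip genre)) PySem.Set.empty
      let score := PySem.Set.len (PySem.Set.inter item_genres liked_genres)
      if 0 < score then recs ++ [(d1.getD "Title" "", score)] else recs) []
  (PySem.List.sorted recommendations (fun x => x.2) true).map (fun x => x.1)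

-- ===== PORT B =====
def recommend_items_alt (user_prefrences : List String) (category_list : List (List (String × String))) : List String :=
  let liked_genres : PySem.Set String := PySem.Set.ofList user_prefrences
  let buckets : PySem.Dict Int (List String) := category_list.foldl (fun b item =>
      let d := PySem.Dict.ofList item
      let genre := PySem.Str.lower (d.getD "Genre" "")
      -- item["Genre"] = genre  (mutation; no effect on the return value)
      let score := PySem.Set.len (PySem.Set.inter (PySem.Set.ofList (((PySem.Str.split? genre ";").getD []).map PySem.Str.strip)) liked_genres)
      if 0 < score then b.modify score [] (fun ts => ts ++ [d.getD "Title" ""]) else b) PySem.Dict.empty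
  (PySem.List.sorted buckets.keys (fun s => s) true).flatMap (fun s => buckets.getD s [])

-- ===== PRECONDITION & SPEC =====
-- the genre-overlap score of one item (lowercase, split on ";", strip, intersect); used by Pre_ and the proofs
def pvItemScore (liked : PySem.Set String) (item : List (String × String)) : Int :=
  PySem.Set.len (PySem.Set.inter (PySem.Set.ofList (((PySem.Str.split? (PySem.Str.lower ((PySem.Dict.ofList item).getD "Genre" "")) ";").getD []).map PySem.Str.strip)) liked)

-- Pre_ excludes exactly the inputs where A raises KeyError: an item without a "Genre" key, or an
-- item whose genre/preference overlap is positive but which has no "Title" key.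
def Pre_recommend_items (user_prefrences : List String) (category_list : List (List (String × String))) : Prop :=
  ∀ item ∈ category_list, (PySem.Dict.ofList item).contains "Genre" = true ∧
    (0 < pvItemScore (PySem.Set.ofList user_prefrences) item → (PySem.Dict.ofList item).contains "Title" = true)
instance (user_prefrences : List String) (category_list : List (List (String × String))) : Decidable (Pre_recommend_items user_prefrences category_list) := by unfold Pre_recommend_items; infer_instance

def pvWitness_recommend_items : List String × (List (List (String × String))) :=
  (["drama"], [[("Genre", "Drama; Comedy"), ("Title", "T1")], [("Genre", "horror"), ("Title", "T2")]])

def Spec_recommend_items (user_prefrences : List String) (category_list : List (List (String × String))) (out : List String) : Prop := out = recommend_items_alt user_prefrences category_list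
instance (user_prefrences : List String) (category_list : List (List (String × String))) (out : List String) : Decidable (Spec_recommend_items user_prefrences category_list out) := by unfold Spec_recommend_items; infer_instance

-- ===== CLAIM (what is proved, stated in full; the proofs are below) =====
def Claim_equal_recommend_items : Prop := ∀ (user_prefrences : List String) (category_list : List (List (String × String))), Dom_recommend_items user_prefrences category_list → Pre_recommend_items user_prefrences category_list → Spec_recommend_items user_prefrences category_list (recommend_items user_prefrences category_list)

-- ===== LEMMAS AND PROOFS =====

-- a conditional fold that consumes only the filtered, mapped elements
theorem foldl_if_filter_map {α β γ : Type} (q : α → Prop) [DecidablePred q] (f : α → β)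
    (step : γ → β → γ) (l : List α) (acc : γ) :
    l.foldl (fun g x => if q x then step g (f x) else g) acc
      = ((l.filter (fun x => decide (q x))).map f).foldl step acc := by
  induction l generalizing acc with
  | nil => rfl
  | cons a l ih =>
      by_cases h : q a <;> simp [h, ih]

theorem insertBy_append_skip {α : Type} (bef : α → α → Bool) (x : α) (as bs : List α)
    (h : ∀ a ∈ as, bef x a = false) :
    PySem.List.insertBy bef x (as ++ bs) = as ++ PySem.List.insertBy bef x bs := by
  induction as with
  | nil => rfl
  | cons a as ih =>
      have ha : bef x a = false := h a (by simp)
      simp [PySem.List.insertBy, ha, ih (fun a ha' => h a (by simp [ha']))]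

theorem insertBy_front {α : Type} (bef : α → α → Bool) (x : α) (l : List α)
    (h : ∀ y ∈ l, bef x y = true) :
    PySem.List.insertBy bef x l = x :: l := by
  cases l with
  | nil => rfl
  | cons y l => simp [PySem.List.insertBy, h y (by simp)]

-- inserting x into a strictly key-descending grouped list when its key group exists:
-- x lands at the end of its own group (stability)
theorem insertBy_flatMap_mem {α : Type} (key : α → Int) (x : α) (ks : List Int) (g : Int → List α)
    (hks : ks.Pairwise (fun a b => b < a))
    (hkey : ∀ s ∈ ks, ∀ y ∈ g s, key y = s)
    (hne : ∀ s ∈ ks, g s ≠ [])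
    (hmem : key x ∈ ks) :
    PySem.List.insertBy (fun a b => decide (key b < key a)) x (ks.flatMap g)
      = ks.flatMap (fun s => if s = key x then g s ++ [x] else g s) := by
  induction ks with
  | nil => simp at hmem
  | cons s ks ih =>
      have hlt : ∀ b ∈ ks, b < s := (List.pairwise_cons.mp hks).1
      have hks' := (List.pairwise_cons.mp hks).2
      have hkey_s : ∀ y ∈ g s, key y = s := hkey s (by simp)
      by_cases hs : s = key x
      · have hskip : ∀ y ∈ g s, (fun a b => decide (key b < key a)) x y = false := by
          intro y hy
          have hk := hkey_s y hy
          simp only [decide_eq_false_iff_not]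
          omega
        have hfront : ∀ y ∈ ks.flatMap g, (fun a b => decide (key b < key a)) x y = true := by
          intro y hy
          obtain ⟨s', hs', hy'⟩ := List.mem_flatMap.mp hy
          have hk := hkey s' (by simp [hs']) y hy'
          have h2 := hlt s' hs'
          simp only [decide_eq_true_eq]
          omega
        rw [List.flatMap_cons, insertBy_append_skip _ _ _ _ hskip, insertBy_front _ _ _ hfront]
        have hcongr : ks.flatMap (fun s' => if s' = key x then g s' ++ [x] else g s') = ks.flatMap g := by
          apply List.flatMap_congr
          intro s' hs'
          have h2 := hlt s' hs'
          have : s' ≠ key x := by omega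
          simp [this]
        rw [List.flatMap_cons, hcongr, if_pos hs]
        simp
      · have hmem' : key x ∈ ks := by
          rcases List.mem_cons.mp hmem with h | h
          · exact absurd h.symm hs
          · exact h
        have hxlt : key x < s := hlt _ hmem'
        have hskip : ∀ y ∈ g s, (fun a b => decide (key b < key a)) x y = false := by
          intro y hy
          have hk := hkey_s y hy
          simp only [decide_eq_false_iff_not]
          omega
        rw [List.flatMap_cons, insertBy_append_skip _ _ _ _ hskip,
            ih hks' (fun s' hs' => hkey s' (by simp [hs'])) (fun s' hs' => hne s' (by simp [hs'])) hmem',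
            List.flatMap_cons, if_neg hs]

-- inserting x whose key is new: x forms a fresh singleton group at its key's sorted position
theorem insertBy_flatMap_not_mem {α : Type} (key : α → Int) (x : α) (ks : List Int) (g : Int → List α)
    (hks : ks.Pairwise (fun a b => b < a))
    (hkey : ∀ s ∈ ks, ∀ y ∈ g s, key y = s)
    (hne : ∀ s ∈ ks, g s ≠ [])
    (hmem : key x ∉ ks) :
    PySem.List.insertBy (fun a b => decide (key b < key a)) x (ks.flatMap g)
      = (PySem.List.insertBy (fun a b => decide (b < a)) (key x) ks).flatMap
          (fun s => if s = key x then [x] else g s) := by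
  induction ks with
  | nil => simp [PySem.List.insertBy]
  | cons s ks ih =>
      have hlt : ∀ b ∈ ks, b < s := (List.pairwise_cons.mp hks).1
      have hks' := (List.pairwise_cons.mp hks).2
      have hsne : s ≠ key x := fun h => hmem (by simp [h])
      have hkey_s : ∀ y ∈ g s, key y = s := hkey s (by simp)
      by_cases hcase : s < key x
      · have hfront : ∀ y ∈ (s :: ks).flatMap g, (fun a b => decide (key b < key a)) x y = true := by
          intro y hy
          obtain ⟨s', hs', hy'⟩ := List.mem_flatMap.mp hy
          have hk := hkey s' hs' y hy'
          simp only [decide_eq_true_eq]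
          rcases List.mem_cons.mp hs' with h | h
          · omega
          · have := hlt s' h; omega
        have hins : PySem.List.insertBy (fun a b => decide (b < a)) (key x) (s :: ks)
            = key x :: s :: ks := by
          simp [PySem.List.insertBy, hcase]
        rw [insertBy_front _ _ _ hfront, hins]
        have hcongr : ks.flatMap (fun s' => if s' = key x then [x] else g s')
            = ks.flatMap g := by
          apply List.flatMap_congr
          intro s' hs'
          have : s' ≠ key x := fun h => hmem (List.mem_cons.mpr (Or.inr (h ▸ hs')))
          simp [this]
        simp only [List.flatMap_cons]
        rw [hcongr]
        simp [hsne]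
      · have hgt : key x < s := by omega
        have hskip : ∀ y ∈ g s, (fun a b => decide (key b < key a)) x y = false := by
          intro y hy
          have hk := hkey_s y hy
          simp only [decide_eq_false_iff_not]
          omega
        have hmem' : key x ∉ ks := fun h => hmem (by simp [h])
        have hins : PySem.List.insertBy (fun a b => decide (b < a)) (key x) (s :: ks)
            = s :: PySem.List.insertBy (fun a b => decide (b < a)) (key x) ks := by
          simp [PySem.List.insertBy, hcase]
        rw [List.flatMap_cons, insertBy_append_skip _ _ _ _ hskip,
            ih hks' (fun s' hs' => hkey s' (by simp [hs'])) (fun s' hs' => hne s' (by simp [hs'])) hmem',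
            hins, List.flatMap_cons, if_neg hsne]

-- strictly descending distinct keys of the sorted key set
theorem sorted_set_desc (ys : List Int) :
    (PySem.List.sorted (PySem.Set.ofList ys) (fun s => s) true).Pairwise (fun a b => b < a) := by
  have hperm := PySem.List.sorted_perm (PySem.Set.ofList ys) (fun s => s) true
  have hnd : (PySem.List.sorted (PySem.Set.ofList ys) (fun s => s) true).Nodup :=
    hperm.symm.nodup (PySem.Set.nodup_ofList ys)
  have hle := PySem.List.sorted_pairwise_rev (PySem.Set.ofList ys) (fun s => s)
  exact (hle.and hnd).imp (fun h => lt_of_le_of_ne h.1 (fun he => h.2 he.symm))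

-- THE CORE LEMMA: a stable descending sort by an Int key is the concatenation, over the distinct
-- keys sorted descending, of the groups of elements with that key in original order.
theorem stable_sort_buckets {α : Type} (key : α → Int) (l : List α) :
    PySem.List.sorted l key true
      = (PySem.List.sorted (PySem.Set.ofList (l.map key)) (fun s => s) true).flatMap
          (fun s => l.filter (fun x => key x == s)) := by
  induction l using List.reverseRecOn with
  | nil => rfl
  | append_singleton l x ih =>
      set S := PySem.Set.ofList (l.map key) with hS
      set K := PySem.List.sorted S (fun s => s) true with hK
      have hstep : PySem.List.sorted (l ++ [x]) key true
          = PySem.List.insertBy (fun a b => decide (key b < key a)) x (PySem.List.sorted l key true) := by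
        rw [PySem.List.sorted_rev_eq_foldl_insertBy, PySem.List.sorted_rev_eq_foldl_insertBy,
            List.foldl_append]
        rfl
      have hdesc : K.Pairwise (fun a b => b < a) := sorted_set_desc _
      have hmemK : ∀ s, s ∈ K ↔ s ∈ l.map key := by
        intro s
        rw [hK, PySem.List.mem_sorted, hS, PySem.Set.mem_ofList]
      have hkey : ∀ s ∈ K, ∀ y ∈ l.filter (fun x => key x == s), key y = s := by
        intro s _ y hy
        simpa using (List.mem_filter.mp hy).2
      have hne : ∀ s ∈ K, l.filter (fun x => key x == s) ≠ [] := by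
        intro s hs
        obtain ⟨y, hy, hky⟩ := List.mem_map.mp ((hmemK s).mp hs)
        have : y ∈ l.filter (fun x => key x == s) := List.mem_filter.mpr ⟨hy, by simp [hky]⟩
        exact List.ne_nil_of_mem this
      have hmapx : (l ++ [x]).map key = l.map key ++ [key x] := by simp
      have hfilter : ∀ s, (l ++ [x]).filter (fun z => key z == s)
          = l.filter (fun z => key z == s) ++ if key x = s then [x] else [] := by
        intro s
        rw [List.filter_append]
        by_cases h : key x = s <;> simp [h]
      by_cases hmem : key x ∈ l.map key
      · -- the key set is unchanged
        have hadd : PySem.Set.ofList ((l ++ [x]).map key) = S := by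
          rw [hmapx, PySem.Set.ofList_eq_foldl, List.foldl_append, ← PySem.Set.ofList_eq_foldl]
          show PySem.Set.add S (key x) = S
          have : key x ∈ S := by rw [hS, PySem.Set.mem_ofList]; exact hmem
          simp [PySem.Set.add, this]
        rw [hstep, ih, insertBy_flatMap_mem key x K _ hdesc hkey hne ((hmemK _).mpr hmem), hadd, ← hK]
        apply List.flatMap_congr
        intro s _
        rw [hfilter s]
        by_cases h : s = key x <;> simp [h]
        intro h'; exact absurd h'.symm h
      · -- the new key is appended to the set and inserted into the sorted keys
        have hadd : PySem.Set.ofList ((l ++ [x]).map key) = S ++ [key x] := by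
          rw [hmapx, PySem.Set.ofList_eq_foldl, List.foldl_append, ← PySem.Set.ofList_eq_foldl]
          show PySem.Set.add S (key x) = S ++ [key x]
          have : key x ∉ S := by rw [hS, PySem.Set.mem_ofList]; exact hmem
          simp [PySem.Set.add, this]
        have hsortedadd : PySem.List.sorted (S ++ [key x]) (fun s => s) true
            = PySem.List.insertBy (fun a b => decide (b < a)) (key x) K := by
          rw [PySem.List.sorted_rev_eq_foldl_insertBy, List.foldl_append, hK,
              PySem.List.sorted_rev_eq_foldl_insertBy]
          rfl
        have hmemKx : key x ∉ K := fun h => hmem ((hmemK _).mp h)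
        rw [hstep, ih, insertBy_flatMap_not_mem key x K _ hdesc hkey hne hmemKx, hadd, hsortedadd]
        apply List.flatMap_congr
        intro s hs
        rcases (PySem.List.mem_insertBy _ _ _ _).mp hs with h | h
        · subst h
          have hempty : l.filter (fun z => key z == key x) = [] := by
            rw [List.filter_eq_nil_iff]
            intro a ha hk
            exact hmem (List.mem_map.mpr ⟨a, ha, by simpa using hk.symm⟩)
          simp [hfilter, hempty]
        · have hne' : s ≠ key x := fun he => hmemKx (he ▸ h)
          rw [hfilter s]
          simp [hne']
          intro h'; exact absurd h'.symm hne'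

-- B's per-item set comprehension equals A's per-item accumulation loop
theorem item_genres_eq (genres : List String) :
    genres.foldl (fun s genre => PySem.Set.add s (PySem.Str.strip genre)) PySem.Set.empty
      = PySem.Set.ofList (genres.map PySem.Str.strip) := by
  rw [show (PySem.Set.empty : PySem.Set String) = ([] : PySem.Set String) from rfl, ← PySem.Set.update_map_eq_foldl_add]
  exact PySem.Set.update_nil_left _

-- record lists both folds consume
def pvTitleOf (item : List (String × String)) : String := (PySem.Dict.ofList item).getD "Title" ""
def pvP (liked : PySem.Set String) (item : List (String × String)) : Bool := decide (0 < pvItemScore liked item)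
def pvRecs (liked : PySem.Set String) (cl : List (List (String × String))) : List (String × Int) :=
  (cl.filter (pvP liked)).map (fun item => (pvTitleOf item, pvItemScore liked item))
def pvRecsSwap (liked : PySem.Set String) (cl : List (List (String × String))) : List (Int × String) :=
  (cl.filter (pvP liked)).map (fun item => (pvItemScore liked item, pvTitleOf item))

theorem foldA_eq (liked : PySem.Set String) (cl : List (List (String × String))) :
    cl.foldl (fun recs item =>
      let d := PySem.Dict.ofList item
      let d1 := d.insert "Genre" (PySem.Str.lower (d.getD "Genre" ""))
      let genres := (PySem.Str.split? (d1.getD "Genre" "") ";").getD []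
      let item_genres : PySem.Set String := genres.foldl (fun s genre => PySem.Set.add s (PySem.Str.strip genre)) PySem.Set.empty
      let score := PySem.Set.len (PySem.Set.inter item_genres liked)
      if 0 < score then recs ++ [(d1.getD "Title" "", score)] else recs) []
    = pvRecs liked cl := by
  have hstep : (fun (recs : List (String × Int)) item =>
      let d := PySem.Dict.ofList item
      let d1 := d.insert "Genre" (PySem.Str.lower (d.getD "Genre" ""))
      let genres := (PySem.Str.split? (d1.getD "Genre" "") ";").getD []
      let item_genres : PySem.Set String := genres.foldl (fun s genre => PySem.Set.add s (PySem.Str.strip genre)) PySem.Set.empty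
      let score := PySem.Set.len (PySem.Set.inter item_genres liked)
      if 0 < score then recs ++ [(d1.getD "Title" "", score)] else recs)
      = (fun recs item => if pvP liked item then recs ++ [(pvTitleOf item, pvItemScore liked item)] else recs) := by
    funext recs item
    simp only [item_genres_eq, PySem.Dict.getD_insert, if_true,
      if_neg (show ¬ ("Title" = "Genre") by decide), pvP, pvItemScore, pvTitleOf, decide_eq_true_eq]
  rw [hstep]
  exact PySem.List.foldl_append_if (pvP liked) (fun item => (pvTitleOf item, pvItemScore liked item)) cl []

theorem foldB_eq (liked : PySem.Set String) (cl : List (List (String × String))) :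
    cl.foldl (fun b item =>
      let d := PySem.Dict.ofList item
      let genre := PySem.Str.lower (d.getD "Genre" "")
      let score := PySem.Set.len (PySem.Set.inter (PySem.Set.ofList (((PySem.Str.split? genre ";").getD []).map PySem.Str.strip)) liked)
      if 0 < score then b.modify score [] (fun ts => ts ++ [d.getD "Title" ""]) else b) PySem.Dict.empty
    = (pvRecsSwap liked cl).foldl (fun d p => d.modify p.1 [] (fun ts => ts ++ [p.2])) PySem.Dict.empty := by
  have h := foldl_if_filter_map (fun item => 0 < pvItemScore liked item)
        (fun item => (pvItemScore liked item, pvTitleOf item))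
        (fun d p => d.modify p.1 [] (fun ts => ts ++ [p.2])) cl (PySem.Dict.empty : PySem.Dict Int (List String))
  exact h

theorem bucket_keys (liked : PySem.Set String) (cl : List (List (String × String))) :
    ((pvRecsSwap liked cl).foldl (fun d p => d.modify p.1 [] (fun ts => ts ++ [p.2])) PySem.Dict.empty).keys
      = PySem.Set.ofList ((pvRecs liked cl).map (fun x => x.2)) := by
  have h := PySem.Dict.keys_foldl_modify_key (pvRecsSwap liked cl) Prod.fst []
      (fun _ p => (fun ts => ts ++ [p.2])) PySem.Dict.empty
  have h2 : ((pvRecsSwap liked cl).map Prod.fst) = (pvRecs liked cl).map (fun x => x.2) := by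
    simp [pvRecsSwap, pvRecs, List.map_map, Function.comp]
  rw [show ((pvRecsSwap liked cl).foldl (fun d p => d.modify p.1 [] (fun ts => ts ++ [p.2])) PySem.Dict.empty)
        = ((pvRecsSwap liked cl).foldl (fun d x => d.modify x.1 [] ((fun _ p => (fun ts => ts ++ [p.2])) d x)) PySem.Dict.empty) from rfl,
      h, h2, PySem.Dict.keys_empty, PySem.Set.update_nil_left]

theorem bucket_getD (liked : PySem.Set String) (cl : List (List (String × String))) (s : Int) :
    ((pvRecsSwap liked cl).foldl (fun d p => d.modify p.1 [] (fun ts => ts ++ [p.2])) PySem.Dict.empty).getD s []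
      = ((pvRecs liked cl).filter (fun x => x.2 == s)).map (fun x => x.1) := by
  rw [PySem.Dict.getD_foldl_modify_append]
  simp [pvRecsSwap, pvRecs, List.filter_map, List.map_map, Function.comp]

theorem portA_eq (up : List String) (cl : List (List (String × String))) :
    recommend_items up cl
      = (PySem.List.sorted (cl.foldl (fun recs item =>
          let d := PySem.Dict.ofList item
          let d1 := d.insert "Genre" (PySem.Str.lower (d.getD "Genre" ""))
          let genres := (PySem.Str.split? (d1.getD "Genre" "") ";").getD []
          let item_genres : PySem.Set String := genres.foldl (fun s genre => PySem.Set.add s (PySem.Str.strip genre)) PySem.Set.empty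
          let score := PySem.Set.len (PySem.Set.inter item_genres (PySem.Set.ofList up))
          if 0 < score then recs ++ [(d1.getD "Title" "", score)] else recs) [])
          (fun x => x.2) true).map (fun x => x.1) := rfl

theorem portB_eq (up : List String) (cl : List (List (String × String))) :
    recommend_items_alt up cl
      = (PySem.List.sorted (cl.foldl (fun b item =>
          let d := PySem.Dict.ofList item
          let genre := PySem.Str.lower (d.getD "Genre" "")
          let score := PySem.Set.len (PySem.Set.inter (PySem.Set.ofList (((PySem.Str.split? genre ";").getD []).map PySem.Str.strip)) (PySem.Set.ofList up))
          if 0 < score then b.modify score [] (fun ts => ts ++ [d.getD "Title" ""]) else b) PySem.Dict.empty).keys (fun s => s) true).flatMap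
        (fun s => (cl.foldl (fun b item =>
          let d := PySem.Dict.ofList item
          let genre := PySem.Str.lower (d.getD "Genre" "")
          let score := PySem.Set.len (PySem.Set.inter (PySem.Set.ofList (((PySem.Str.split? genre ";").getD []).map PySem.Str.strip)) (PySem.Set.ofList up))
          if 0 < score then b.modify score [] (fun ts => ts ++ [d.getD "Title" ""]) else b) PySem.Dict.empty).getD s []) := rfl

-- ===== VERDICT (by name: the statement is the Claim_ definition above) =====
set_option maxHeartbeats 1000000 in
theorem recommend_items_spec : Claim_equal_recommend_items := by
  intro up cl _ _
  unfold Spec_recommend_items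
  rw [portA_eq, portB_eq, foldA_eq, foldB_eq, bucket_keys,
      stable_sort_buckets (fun x => x.2) (pvRecs (PySem.Set.ofList up) cl), List.map_flatMap]
  apply List.flatMap_congr
  intro s _
  rw [bucket_getD]
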